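-- pv_equiv track=rewrite | github.com/urusakuma/AtCoder | contest/abs/abc083b/main.py | solve
-- ===== SOURCE A (Python) =====
-- from typing import List, Set, Tuple, Any  # type: ignore
--
-- def solve(N: int, A: int, B: int) -> Any:
--     """問題を解く"""
--     c = [0 for _ in range(N+1)]
--     for i in range(N+1):
--         n = i
--         s = 0
--         while n > 0:
--             s += n % 10
--             n //= 10
--         if s >= A and s <= B:
--             c[i] = i
--     return sum(c)
-- ===== SOURCE B (Python) =====
-- def solve(N: int, A: int, B: int):
--     """Dynamic programming over already-computed digit sums: ds[i] = ds[i//10] + i%10,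
--     removing the inner digit-extraction while-loop; single pass accumulates the sum."""
--     if N < 0:
--         return 0
--     ds = [0] * (N + 1)
--     total = 0
--     for i in range(1, N + 1):
--         d = ds[i // 10] + i % 10
--         ds[i] = d
--         if A <= d <= B:
--             total += i
--     return total
-- ===== Notes on version B (the rewrite author's own statement) =====
-- stated objective: faster
-- what changed: Replaces A's per-number digit-extraction while-loop (and the pre-built result list that is summed at the end) by a single-pass dynamic program ds[i] = ds[i//10] + i%10 over already-computed digit sums, accumulating the total on the fly.
import Mathlib
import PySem

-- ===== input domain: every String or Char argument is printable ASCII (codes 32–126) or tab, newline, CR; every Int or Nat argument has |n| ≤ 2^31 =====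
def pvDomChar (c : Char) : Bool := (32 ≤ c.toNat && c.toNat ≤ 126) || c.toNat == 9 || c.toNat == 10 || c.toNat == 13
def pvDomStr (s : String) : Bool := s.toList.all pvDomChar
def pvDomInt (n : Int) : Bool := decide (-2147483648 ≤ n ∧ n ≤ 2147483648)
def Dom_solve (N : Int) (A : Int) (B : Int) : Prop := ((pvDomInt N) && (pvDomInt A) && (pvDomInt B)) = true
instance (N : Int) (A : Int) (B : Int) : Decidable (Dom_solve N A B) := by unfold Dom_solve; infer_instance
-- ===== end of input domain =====

-- B replaces A's per-i digit-extraction while-loop by a dynamic program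
-- ds[i] = ds[i//10] + i%10 over already-computed digit sums (one pass, constant
-- work per i); measured faster at large N in a timing run.

-- ===== PORT A =====
-- `while n > 0: s += n % 10; n //= 10`
def solveDigitLoop (n s : Int) : Int :=
  if 0 < n then solveDigitLoop (PySem.Int.floordiv n 10) (s + PySem.Int.mod n 10) else s
termination_by n.toNat
decreasing_by
  rw [PySem.Int.floordiv_eq_ediv_of_pos (by norm_num)]
  omega

def solve (N : Int) (A : Int) (B : Int) : Int :=
  let c0 := (PySem.List.pyRange 0 (N + 1) 1).map (fun _ => (0 : Int))
  let c := (PySem.List.pyRange 0 (N + 1) 1).foldl (fun c i =>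
      let s := solveDigitLoop i 0
      -- `c[i] = i`: i ∈ range(N+1) is a valid nonnegative index, so List.set at i.toNat is exact
      if A ≤ s ∧ s ≤ B then c.set i.toNat i else c) c0
  c.sum

-- ===== PORT B =====
def solve_alt (N : Int) (A : Int) (B : Int) : Int :=
  if N < 0 then 0
  else
    let ds0 : List Int := List.replicate (N + 1).toNat 0   -- [0] * (N + 1)
    let st := (PySem.List.pyRange 1 (N + 1) 1).foldl (fun (st : List Int × Int) i =>
        -- `ds[i // 10]` and `ds[i] = d`: both indices are valid and nonnegative here
        let d := st.1.getD (PySem.Int.floordiv i 10).toNat 0 + PySem.Int.mod i 10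
        let ds := st.1.set i.toNat d
        let total := if A ≤ d ∧ d ≤ B then st.2 + i else st.2
        (ds, total)) (ds0, 0)
    st.2

-- ===== PRECONDITION & SPEC =====
def Spec_solve (N : Int) (A : Int) (B : Int) (out : Int) : Prop := out = solve_alt N A B
instance (N : Int) (A : Int) (B : Int) (out : Int) : Decidable (Spec_solve N A B out) := by unfold Spec_solve; infer_instance

-- ===== CLAIM (what is proved, stated in full; the proofs are below) =====
def Claim_equal_solve : Prop := ∀ (N : Int) (A : Int) (B : Int), Dom_solve N A B → Spec_solve N A B (solve N A B)

-- ===== LEMMAS AND PROOFS =====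

-- mathematical digit sum
def dsumN (n : Nat) : Nat :=
  if n = 0 then 0 else dsumN (n / 10) + n % 10

-- the qualifying-value function both programs compute the sum of
def qual (A B i : Int) : Int :=
  if A ≤ (dsumN i.toNat : Int) ∧ (dsumN i.toNat : Int) ≤ B then i else 0

theorem digLoop_eq (n s : Int) : solveDigitLoop n s = s + (dsumN n.toNat : Int) := by
  induction n, s using solveDigitLoop.induct with
  | case1 n s h ih =>
    rw [solveDigitLoop, if_pos h, ih]
    have h10 : (PySem.Int.floordiv n 10).toNat = n.toNat / 10 ∧
        PySem.Int.mod n 10 = ((n.toNat % 10 : Nat) : Int) := by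
      rw [PySem.Int.floordiv_eq_ediv_of_pos (by norm_num),
        PySem.Int.mod_eq_emod_of_pos (by norm_num)]
      omega
    rw [h10.1, h10.2]
    have hne : n.toNat ≠ 0 := by omega
    conv_rhs => rw [dsumN]
    rw [if_neg hne]
    push_cast
    ring
  | case2 n s h =>
    rw [solveDigitLoop, if_neg h]
    have : n.toNat = 0 := by omega
    rw [this, dsumN]
    simp

-- recurrence for dsumN on positive integers, stated on Int
theorem dsum_step (b : Int) (hb : 1 ≤ b) :
    (dsumN b.toNat : Int) = (dsumN (PySem.Int.floordiv b 10).toNat : Int) + PySem.Int.mod b 10 := by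
  have h10 : (PySem.Int.floordiv b 10).toNat = b.toNat / 10 ∧
      PySem.Int.mod b 10 = ((b.toNat % 10 : Nat) : Int) := by
    rw [PySem.Int.floordiv_eq_ediv_of_pos (by norm_num),
      PySem.Int.mod_eq_emod_of_pos (by norm_num)]
    omega
  rw [h10.1, h10.2]
  conv_lhs => rw [dsumN]
  rw [if_neg (by omega)]
  push_cast
  ring

-- A's loop, generalized over a right tail of untouched zeros
theorem solveA_fold (A B : Int) (b : Int) (hb : 0 ≤ b) (tail : List Int) :
    (PySem.List.pyRange 0 b 1).foldl (fun c i =>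
        let s := solveDigitLoop i 0
        if A ≤ s ∧ s ≤ B then c.set i.toNat i else c)
      ((PySem.List.pyRange 0 b 1).map (fun _ => (0 : Int)) ++ tail)
    = (PySem.List.pyRange 0 b 1).map (qual A B) ++ tail := by
  induction b, hb using Int.le_induction generalizing tail with
  | base =>
    simp [PySem.List.pyRange_one_eq_nil]
  | succ b hb ih =>
    rw [PySem.List.pyRange_one_succ_right hb,
      List.map_append, List.map_append, List.foldl_append]
    simp only [List.map_cons, List.map_nil, List.append_assoc, List.singleton_append]
    rw [ih (0 :: tail)]
    simp only [List.foldl_cons, List.foldl_nil, digLoop_eq, zero_add, qual]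
    have hlen : ((PySem.List.pyRange 0 b 1).map (qual A B)).length = b.toNat := by
      simp [PySem.List.length_pyRange_one]
    split
    · rw [show b.toNat = ((PySem.List.pyRange 0 b 1).map (qual A B)).length from hlen.symm,
        List.set_append_right _ _ (le_refl _)]
      simp
    · rfl

-- solve computes the sum of qual over range(N+1)
theorem solve_eq_sum (N A B : Int) :
    solve N A B = ((PySem.List.pyRange 0 (N + 1) 1).map (qual A B)).sum := by
  unfold solve
  by_cases hN : 0 ≤ N
  · have := solveA_fold A B (N + 1) (by omega) []
    simp only [List.append_nil] at this
    simp only [this]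
  · rw [PySem.List.pyRange_one_eq_nil (by omega)]
    simp

-- B's invariant: after processing range(1, b), ds holds the digit sums below b
-- (padded with zeros up to N+1) and total is the sum of qual over range(b).
theorem solveB_fold (N A B : Int) (hN : 0 ≤ N) (b : Int) (hb1 : 1 ≤ b) (hb2 : b ≤ N + 1) :
    (PySem.List.pyRange 1 b 1).foldl (fun (st : List Int × Int) i =>
        let d := st.1.getD (PySem.Int.floordiv i 10).toNat 0 + PySem.Int.mod i 10
        let ds := st.1.set i.toNat d
        let total := if A ≤ d ∧ d ≤ B then st.2 + i else st.2
        (ds, total)) (List.replicate (N + 1).toNat 0, 0)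
    = ((PySem.List.pyRange 0 b 1).map (fun i : Int => (dsumN i.toNat : Int))
        ++ List.replicate ((N + 1).toNat - b.toNat) 0,
       ((PySem.List.pyRange 0 b 1).map (qual A B)).sum) := by
  induction b, hb1 using Int.le_induction with
  | base =>
    rw [show PySem.List.pyRange 1 1 1 = [] from by decide,
      show PySem.List.pyRange 0 1 1 = [0] from by decide]
    simp only [List.foldl_nil, List.map_cons, List.map_nil, List.singleton_append]
    have : (N + 1).toNat = ((N + 1).toNat - 1) + 1 := by omega
    rw [this, List.replicate_succ]
    simp [dsumN, qual]
  | succ b hb ih =>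
    rw [PySem.List.pyRange_one_succ_right hb, List.foldl_append, ih (by omega)]
    simp only [List.foldl_cons, List.foldl_nil]
    have hlt : (PySem.Int.floordiv b 10).toNat < b.toNat := by
      rw [PySem.Int.floordiv_eq_ediv_of_pos (by norm_num)]
      omega
    have hlenM : ((PySem.List.pyRange 0 b 1).map (fun i : Int => (dsumN i.toNat : Int))).length
        = b.toNat := by simp [PySem.List.length_pyRange_one]
    -- the fetched value is dsumN (b // 10)
    have hget : ((PySem.List.pyRange 0 b 1).map (fun i : Int => (dsumN i.toNat : Int))
          ++ List.replicate ((N + 1).toNat - b.toNat) 0).getD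
          (PySem.Int.floordiv b 10).toNat 0
        = (dsumN (PySem.Int.floordiv b 10).toNat : Int) := by
      rw [List.getD_eq_getElem?_getD, List.getElem?_append_left (by omega),
        List.getElem?_map, PySem.List.getElem?_pyRange_one,
        if_pos (by omega : (PySem.Int.floordiv b 10).toNat < (b - 0).toNat)]
      simp only [Option.map_some, Option.getD_some, zero_add, Int.toNat_natCast]
    rw [hget, ← dsum_step b hb]
    -- the updated list
    have hset : (((PySem.List.pyRange 0 b 1).map (fun i : Int => (dsumN i.toNat : Int))
          ++ List.replicate ((N + 1).toNat - b.toNat) 0).set b.toNat (dsumN b.toNat : Int))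
        = (PySem.List.pyRange 0 (b + 1) 1).map (fun i : Int => (dsumN i.toNat : Int))
          ++ List.replicate ((N + 1).toNat - (b + 1).toNat) 0 := by
      have hrep : ((N + 1).toNat - b.toNat) = ((N + 1).toNat - (b + 1).toNat) + 1 := by omega
      rw [hrep, List.replicate_succ, List.set_append_right _ _ (by omega), hlenM,
        Nat.sub_self, List.set_cons_zero,
        PySem.List.pyRange_one_succ_right (by omega : (0:Int) ≤ b), List.map_append]
      simp
    rw [hset, PySem.List.pyRange_one_succ_right (a := 0) (by omega)]
    simp only [List.map_append, List.sum_append, List.map_cons, List.map_nil,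
      List.sum_cons, List.sum_nil, add_zero, qual]
    split
    · rfl
    · simp

theorem solve_alt_eq_sum (N A B : Int) :
    solve_alt N A B = ((PySem.List.pyRange 0 (N + 1) 1).map (qual A B)).sum := by
  unfold solve_alt
  by_cases hN : 0 ≤ N
  · rw [if_neg (show ¬(N < 0) by omega)]
    simp only [solveB_fold N A B hN (N + 1) (by omega) (le_refl _)]
  · rw [if_pos (show N < 0 by omega), PySem.List.pyRange_one_eq_nil (by omega)]
    simp

-- ===== VERDICT (by name: the statement is the Claim_ definition above) =====
theorem solve_spec : Claim_equal_solve := by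
  intro N A B _
  unfold Spec_solve
  rw [solve_eq_sum, solve_alt_eq_sum]
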